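-- pv_equiv track=rewrite | github.com/facusapienza21/Fermat-distance | fermat/path_methods/LandmarksMethod.py | get_rmq_posta
-- ===== SOURCE A (Python) =====
-- def get_rmq_posta(xs):
--     res = [xs[:]]
--     n = len(xs)
--     p = 1
--     while p < n:
--         res.append(
--             [min(res[-1][i], res[-1][i + p]) if i + p < n else res[-1][i] for i in range(n)]
--         )
--         p *= 2
--     return res
-- ===== SOURCE B (Python) =====
-- def get_rmq_posta(xs):
--     n = len(xs)
--     widths = [1]
--     while widths[-1] < n:
--         widths.append(widths[-1] * 2)
--     return [[min(xs[i:i + w]) for i in range(n)] for w in widths]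
-- ===== Notes on version B (the rewrite author's own statement) =====
-- stated objective: alternative
-- what changed: B first materialises the list of window widths [1,2,4,...] and then builds every sparse-table level independently as clamped window minima min(xs[i:i+w]) over the original array, replacing A's in-place doubling DP where each level is derived from the previous one.
import Mathlib
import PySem

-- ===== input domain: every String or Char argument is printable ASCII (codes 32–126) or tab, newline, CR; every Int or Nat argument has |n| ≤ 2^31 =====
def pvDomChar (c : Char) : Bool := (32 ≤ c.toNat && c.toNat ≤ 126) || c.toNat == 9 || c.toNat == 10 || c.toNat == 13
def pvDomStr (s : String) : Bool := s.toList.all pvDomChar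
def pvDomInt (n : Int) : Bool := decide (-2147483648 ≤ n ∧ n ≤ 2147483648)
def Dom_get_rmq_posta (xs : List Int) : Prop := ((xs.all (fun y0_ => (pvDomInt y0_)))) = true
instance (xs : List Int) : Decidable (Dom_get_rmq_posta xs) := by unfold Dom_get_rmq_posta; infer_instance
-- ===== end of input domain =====

-- B materialises the width list [1,2,4,...] and builds each level independently as clamped
-- window minima of the original array, instead of A's level-from-previous-level doubling DP.


-- ===== PORT A =====
-- one level of A's DP: [min(prev[i], prev[i+p]) if i+p<n else prev[i] for i in range(n)]
-- (indices are always in range in the Python, so getD's default is never used)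
def aLevel (prev : List Int) (p n : Nat) : List Int :=
  (List.range n).map (fun i => if i + p < n then min (prev.getD i 0) (prev.getD (i + p) 0) else prev.getD i 0)

-- the while loop; '0 < p' only makes termination evident (Python's p starts at 1 and doubles)
def aLoop (n : Nat) (res : List (List Int)) (p : Nat) : List (List Int) :=
  if h : p < n ∧ 0 < p then
    aLoop n (res ++ [aLevel (res.getLastD []) p n]) (p * 2)
  else res
termination_by n - p
decreasing_by omega

def get_rmq_posta (xs : List Int) : List (List Int) :=
  aLoop xs.length [xs] 1

-- ===== PORT B =====
-- the width list [1, 2, 4, ...]: 'widths = [1]; while widths[-1] < n: widths.append(widths[-1]*2)'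
-- ('0 < w' only makes termination evident; w starts at 1 and doubles)
def bWidths (n w : Nat) : List Nat :=
  w :: (if h : w < n ∧ 0 < w then bWidths n (w * 2) else [])
termination_by n - w
decreasing_by omega

-- one level of B: [min(xs[i:i+w]) for i in range(n)]; the slice is nonempty (i < n), so min never raises
def bLevel (xs : List Int) (w : Nat) : List Int :=
  (List.range xs.length).map
    (fun (i : Nat) => (PySem.List.min? (PySem.List.slice xs (some (i : Int)) (some ((i : Int) + (w : Int)))) (fun y => y)).getD 0)

def get_rmq_posta_alt (xs : List Int) : List (List Int) :=
  (bWidths xs.length 1).map (bLevel xs)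

-- ===== PRECONDITION & SPEC =====
def Spec_get_rmq_posta (xs : List Int) (out : List (List Int)) : Prop := out = get_rmq_posta_alt xs
instance (xs : List Int) (out : List (List Int)) : Decidable (Spec_get_rmq_posta xs out) := by unfold Spec_get_rmq_posta; infer_instance

-- ===== CLAIM (what is proved, stated in full; the proofs are below) =====
def Claim_equal_get_rmq_posta : Prop := ∀ (xs : List Int), Dom_get_rmq_posta xs → Spec_get_rmq_posta xs (get_rmq_posta xs)

-- ===== LEMMAS AND PROOFS =====

-- the clamped window minimum min(xs[i:i+w]) as a value (0 only when the window is empty)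
def wmin (xs : List Int) (i w : Nat) : Int :=
  (PySem.List.min? ((xs.drop i).take w) (fun y => y)).getD 0

-- the ideal level for window width w
def levelMap (xs : List Int) (w : Nat) : List Int :=
  (List.range xs.length).map (fun i => wmin xs i w)

theorem bLevel_eq (xs : List Int) (w : Nat) : bLevel xs w = levelMap xs w := by
  unfold bLevel levelMap wmin
  refine List.map_congr_left (fun i _ => ?_)
  rw [PySem.List.slice_natCast_add]

theorem foldl_min_pull (t : List Int) (a b : Int) :
    t.foldl min (min a b) = min a (t.foldl min b) := by
  induction t generalizing b with
  | nil => simp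
  | cons h tl ih => simp only [List.foldl]; rw [min_assoc]; exact ih (min b h)

-- min? of a nonempty concatenation, value-wise
theorem min_getD_append (l1 l2 : List Int) (h1 : l1 ≠ []) (h2 : l2 ≠ []) :
    (PySem.List.min? (l1 ++ l2) (fun y => y)).getD 0
      = min ((PySem.List.min? l1 (fun y => y)).getD 0) ((PySem.List.min? l2 (fun y => y)).getD 0) := by
  obtain ⟨x, t1, rfl⟩ := List.exists_cons_of_ne_nil h1
  obtain ⟨y, t2, rfl⟩ := List.exists_cons_of_ne_nil h2
  rw [List.cons_append, PySem.List.min?_id_cons, PySem.List.min?_id_cons, PySem.List.min?_id_cons]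
  simp only [Option.getD_some]
  rw [List.foldl_append, List.foldl_cons, foldl_min_pull]

theorem wmin_merge (xs : List Int) (i p : Nat) (hp : 0 < p) (h : i + p < xs.length) :
    min (wmin xs i p) (wmin xs (i + p) p) = wmin xs i (p * 2) := by
  unfold wmin
  have hsplit : (xs.drop i).take (p * 2) = (xs.drop i).take p ++ ((xs.drop (i + p)).take p) := by
    rw [show p * 2 = p + p by ring, List.take_add]
    congr 1
    rw [List.drop_drop, Nat.add_comm]
  rw [hsplit, min_getD_append]
  · intro hnil
    have := congrArg List.length hnil
    simp [List.length_take, List.length_drop] at this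
    omega
  · intro hnil
    have := congrArg List.length hnil
    simp [List.length_take, List.length_drop] at this
    omega

theorem wmin_clamp (xs : List Int) (i p : Nat) (h : ¬ i + p < xs.length) :
    wmin xs i p = wmin xs i (p * 2) := by
  unfold wmin
  rw [List.take_of_length_le (by simp [List.length_drop]; omega),
      List.take_of_length_le (by simp [List.length_drop]; omega)]

theorem map_range_getD (n i : Nat) (f : Nat → Int) (hi : i < n) :
    ((List.range n).map f).getD i 0 = f i := by
  rw [List.getD_eq_getElem?_getD]
  simp [hi]

theorem aLevel_eq (xs : List Int) (p : Nat) (hp : 0 < p) :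
    aLevel (levelMap xs p) p xs.length = levelMap xs (p * 2) := by
  unfold aLevel
  conv_rhs => rw [levelMap]
  refine List.map_congr_left (fun i hi => ?_)
  have hi' : i < xs.length := List.mem_range.mp hi
  rw [levelMap, map_range_getD _ _ _ hi']
  by_cases hip : i + p < xs.length
  · rw [if_pos hip, map_range_getD _ _ _ hip, wmin_merge xs i p hp hip]
  · rw [if_neg hip, wmin_clamp xs i p hip]

theorem levelMap_one (xs : List Int) : levelMap xs 1 = xs := by
  apply List.ext_getElem
  · simp [levelMap]
  · intro i h1 h2
    have hi : i < xs.length := h2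
    simp only [levelMap, List.getElem_map, List.getElem_range]
    unfold wmin
    rw [List.drop_eq_getElem_cons hi, List.take_succ_cons, List.take_zero,
        PySem.List.min?_id_cons]
    simp

-- A's loop from state (acc ++ [level p], p) produces exactly the levels for widths bWidths n p
theorem loop_eq_aux (xs : List Int) (k : Nat) :
    ∀ (p : Nat) (acc : List (List Int)), xs.length - p ≤ k → 0 < p →
      aLoop xs.length (acc ++ [levelMap xs p]) p
        = acc ++ (bWidths xs.length p).map (levelMap xs) := by
  induction k with
  | zero =>
    intro p acc hk hp
    rw [aLoop, dif_neg (by omega), bWidths, dif_neg (by omega)]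
    simp
  | succ k ih =>
    intro p acc hk hp
    by_cases hpn : p < xs.length
    · rw [aLoop, dif_pos ⟨hpn, hp⟩]
      have hlast : (acc ++ [levelMap xs p]).getLastD [] = levelMap xs p := by simp
      rw [hlast, aLevel_eq xs p hp,
          show acc ++ [levelMap xs p] ++ [levelMap xs (p * 2)]
             = (acc ++ [levelMap xs p]) ++ [levelMap xs (p * 2)] from rfl,
          ih (p * 2) (acc ++ [levelMap xs p]) (by omega) (by omega)]
      conv_rhs => rw [bWidths, dif_pos ⟨hpn, hp⟩]
      simp
    · rw [aLoop, dif_neg (by omega), bWidths, dif_neg (by omega)]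
      simp

-- ===== VERDICT (by name: the statement is the Claim_ definition above) =====
theorem get_rmq_posta_spec : Claim_equal_get_rmq_posta := by
  intro xs _
  unfold Spec_get_rmq_posta get_rmq_posta get_rmq_posta_alt
  have h := loop_eq_aux xs (xs.length - 1) 1 [] (by omega) (by omega)
  simp only [List.nil_append] at h
  rw [show ([xs] : List (List Int)) = [levelMap xs 1] by rw [levelMap_one], h]
  refine List.map_congr_left (fun w _ => ?_)
  rw [bLevel_eq]
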